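-- pv_equiv track=rewrite | github.com/AIcarusDev/AIcarusProtocols | src/aicarus_protocols/common.py | validate_event_type
-- ===== SOURCE A (Python) =====
-- def validate_event_type(event_type: str) -> bool:
--     """验证事件类型格式是否正确。"""
--     valid_prefixes = [
--         "message.",
--         "notice.",
--         "request.",
--         "action.",
--         "action_response.",
--         "meta.",
--     ]
--     return any(event_type.startswith(prefix) for prefix in valid_prefixes)
-- ===== SOURCE B (Python) =====
-- def validate_event_type(event_type: str) -> bool:
--     """验证事件类型格式是否正确。"""
--     root, sep, _ = event_type.partition(".")
--     return sep == "." and root in {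
--         "message", "notice", "request", "action", "action_response", "meta",
--     }
-- ===== Notes on version B (the rewrite author's own statement) =====
-- stated objective: idiomatic
-- what changed: B partitions the string at the first dot once and does a single set lookup of the root token, instead of scanning the string against six prefixes with startswith.
import Mathlib
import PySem

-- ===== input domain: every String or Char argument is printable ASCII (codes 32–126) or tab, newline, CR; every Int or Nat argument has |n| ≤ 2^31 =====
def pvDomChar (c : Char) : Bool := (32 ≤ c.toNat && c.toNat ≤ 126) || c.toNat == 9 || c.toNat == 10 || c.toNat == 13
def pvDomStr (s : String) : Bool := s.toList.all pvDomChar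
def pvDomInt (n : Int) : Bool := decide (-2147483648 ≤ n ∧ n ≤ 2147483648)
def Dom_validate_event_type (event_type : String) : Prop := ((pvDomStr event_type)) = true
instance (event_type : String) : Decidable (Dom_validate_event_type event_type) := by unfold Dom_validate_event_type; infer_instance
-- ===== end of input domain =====

-- B parses the root token before the first dot once and does a single membership test,
-- instead of scanning the string against six prefixes (objective: idiomatic).


-- ===== PORT A =====
def validate_event_type (event_type : String) : Bool :=
  ["message.", "notice.", "request.", "action.", "action_response.", "meta."].any
    (fun p => PySem.Str.startswith event_type p)

-- ===== PORT B =====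
-- partition(".") ported by hand: root = chars before the first '.', rest = from the first '.' on;
-- sep == "." ↔ rest nonempty. Exact for this use (only the root and dot-presence are consumed).
def validate_event_type_alt (event_type : String) : Bool :=
  let cs := event_type.toList
  let root := cs.takeWhile (fun c => c ≠ '.')
  let rest := cs.dropWhile (fun c => c ≠ '.')
  (!rest.isEmpty) &&
    (["message", "notice", "request", "action", "action_response", "meta"].map
      String.toList).contains root

-- ===== PRECONDITION & SPEC =====
def Spec_validate_event_type (event_type : String) (out : Bool) : Prop := out = validate_event_type_alt event_type
instance (event_type : String) (out : Bool) : Decidable (Spec_validate_event_type event_type out) := by unfold Spec_validate_event_type; infer_instance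

-- ===== CLAIM (what is proved, stated in full; the proofs are below) =====
def Claim_equal_validate_event_type : Prop := ∀ (event_type : String), Dom_validate_event_type event_type → Spec_validate_event_type event_type (validate_event_type event_type)

-- ===== LEMMAS AND PROOFS =====

-- 'r ++ "." is a prefix of s' ↔ 'the chunk of s before its first dot is r, and s has a dot'
theorem prefix_dot_iff (r s : List Char) (hr : '.' ∉ r) :
    (r ++ ['.']) <+: s ↔
      (s.takeWhile (fun c => c ≠ '.') = r ∧ s.dropWhile (fun c => c ≠ '.') ≠ []) := by
  induction r generalizing s with
  | nil =>
    cases s with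
    | nil => simp
    | cons c t =>
      by_cases hc : c = '.'
      · simp [hc, List.cons_prefix_cons]
      · simp [hc, List.cons_prefix_cons]
        exact fun h => hc h.symm
  | cons a r' ih =>
    have ha : a ≠ '.' := fun h => hr (h ▸ List.mem_cons_self)
    have hr' : '.' ∉ r' := fun h => hr (List.mem_cons_of_mem _ h)
    cases s with
    | nil => simp
    | cons c t =>
      by_cases hca : c = a
      · subst hca
        simp [ha, List.cons_prefix_cons, ih t hr']
      · constructor
        · intro h
          exact absurd (List.cons_prefix_cons.mp h).1.symm hca
        · rintro ⟨hts, -⟩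
          by_cases hc : c = '.'
          · simp [hc] at hts
          · simp [hc] at hts
            exact absurd hts.1 hca

-- ===== VERDICT (by name: the statement is the Claim_ definition above) =====
theorem validate_event_type_spec : Claim_equal_validate_event_type := by
  intro s _
  unfold Spec_validate_event_type validate_event_type validate_event_type_alt
  apply Bool.eq_iff_iff.mpr
  have e1 : "message.".toList = "message".toList ++ ['.'] := rfl
  have e2 : "notice.".toList = "notice".toList ++ ['.'] := rfl
  have e3 : "request.".toList = "request".toList ++ ['.'] := rfl
  have e4 : "action.".toList = "action".toList ++ ['.'] := rfl
  have e5 : "action_response.".toList = "action_response".toList ++ ['.'] := rfl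
  have e6 : "meta.".toList = "meta".toList ++ ['.'] := rfl
  simp only [List.any_cons, List.any_nil, Bool.or_eq_true, PySem.Str.startswith_eq,
    PySem.Chars.startswith_iff, e1, e2, e3, e4, e5, e6,
    prefix_dot_iff _ _ (by decide : '.' ∉ "message".toList),
    prefix_dot_iff _ _ (by decide : '.' ∉ "notice".toList),
    prefix_dot_iff _ _ (by decide : '.' ∉ "request".toList),
    prefix_dot_iff _ _ (by decide : '.' ∉ "action".toList),
    prefix_dot_iff _ _ (by decide : '.' ∉ "action_response".toList),
    prefix_dot_iff _ _ (by decide : '.' ∉ "meta".toList),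
    Bool.and_eq_true, Bool.not_eq_true', List.isEmpty_eq_false_iff,
    List.contains_eq_mem, List.mem_map, List.mem_cons, List.not_mem_nil,
    decide_eq_true_eq, ne_eq, decide_not]
  constructor
  · rintro (⟨h, hn⟩|⟨h, hn⟩|⟨h, hn⟩|⟨h, hn⟩|⟨h, hn⟩|⟨h, hn⟩|h)
    · exact ⟨hn, "message", by simp, h.symm⟩
    · exact ⟨hn, "notice", by simp, h.symm⟩
    · exact ⟨hn, "request", by simp, h.symm⟩
    · exact ⟨hn, "action", by simp, h.symm⟩
    · exact ⟨hn, "action_response", by simp, h.symm⟩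
    · exact ⟨hn, "meta", by simp, h.symm⟩
    · exact absurd h (by simp)
  · rintro ⟨hn, x, hx, hfx⟩
    rcases hx with h|h|h|h|h|h|h
    · exact Or.inl ⟨h ▸ hfx.symm, hn⟩
    · exact Or.inr (Or.inl ⟨h ▸ hfx.symm, hn⟩)
    · exact Or.inr (Or.inr (Or.inl ⟨h ▸ hfx.symm, hn⟩))
    · exact Or.inr (Or.inr (Or.inr (Or.inl ⟨h ▸ hfx.symm, hn⟩)))
    · exact Or.inr (Or.inr (Or.inr (Or.inr (Or.inl ⟨h ▸ hfx.symm, hn⟩))))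
    · exact Or.inr (Or.inr (Or.inr (Or.inr (Or.inr (Or.inl ⟨h ▸ hfx.symm, hn⟩)))))
    · exact absurd h (by simp)
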